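-- pv_equiv track=rewrite | github.com/malikmayank/climateweek-hackathon | context.py | is_valid_context_path
-- ===== SOURCE A (Python) =====
-- def is_valid_context_path(context_path: str) -> bool:
--     if not context_path or not isinstance(context_path, str):
--         return False
--
--     # Basic validation rules
--     parts = context_path.split('.')
--
--     # Must have at least one part
--     if not parts or not parts[0]:
--         return False
--
--     # All parts must be non-empty
--     for part in parts:
--         if not part:
--             return False
--
--     return True
-- ===== SOURCE B (Python) =====
-- def is_valid_context_path(context_path: str) -> bool:
--     # B: no split, no per-part loop — a path is valid iff it is a non-empty
--     # string with no leading dot, no trailing dot and no two adjacent dots.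
--     if not isinstance(context_path, str) or not context_path:
--         return False
--     return not (context_path.startswith('.')
--                 or context_path.endswith('.')
--                 or '..' in context_path)
-- ===== Notes on version B (the rewrite author's own statement) =====
-- stated objective: simpler
-- what changed: B replaces split('.') plus a per-part emptiness loop by three direct substring tests: a dotted path is valid iff it is non-empty, does not start or end with '.', and contains no '..'.
import Mathlib
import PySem

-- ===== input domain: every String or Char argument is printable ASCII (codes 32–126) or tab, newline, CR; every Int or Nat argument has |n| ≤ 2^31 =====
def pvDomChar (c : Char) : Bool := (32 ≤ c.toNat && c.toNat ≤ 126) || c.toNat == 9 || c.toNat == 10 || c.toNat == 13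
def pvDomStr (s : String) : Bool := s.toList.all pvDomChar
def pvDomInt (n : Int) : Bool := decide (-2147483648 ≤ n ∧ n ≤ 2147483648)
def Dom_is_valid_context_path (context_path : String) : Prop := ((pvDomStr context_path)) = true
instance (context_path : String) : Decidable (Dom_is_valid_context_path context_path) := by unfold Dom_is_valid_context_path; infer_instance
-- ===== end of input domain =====

-- B validates the dotted path with three substring tests (no leading/trailing dot, no '..')
-- instead of A's split('.') plus a per-part emptiness loop; same value on every string.

-- ===== PORT A =====
def is_valid_context_path_loop : List (List Char) → Bool
  | [] => true
  | p :: rest => if p.isEmpty then false else is_valid_context_path_loop rest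

def is_valid_context_path (context_path : String) : Bool :=
  if context_path == "" then false
  else
    match PySem.Chars.splitOn context_path.toList ['.'] with
    | [] => false
    | p0 :: rest => if p0.isEmpty then false else is_valid_context_path_loop (p0 :: rest)

-- ===== PORT B =====
def is_valid_context_path_alt (context_path : String) : Bool :=
  if context_path == "" then false
  else !(PySem.Str.startswith context_path "." || PySem.Str.endswith context_path "." ||
         PySem.Str.isIn ".." context_path)

-- ===== PRECONDITION & SPEC =====
def Spec_is_valid_context_path (context_path : String) (out : Bool) : Prop := out = is_valid_context_path_alt context_path
instance (context_path : String) (out : Bool) : Decidable (Spec_is_valid_context_path context_path out) := by unfold Spec_is_valid_context_path; infer_instance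

-- ===== CLAIM (what is proved, stated in full; the proofs are below) =====
def Claim_equal_is_valid_context_path : Prop := ∀ (context_path : String), Dom_is_valid_context_path context_path → Spec_is_valid_context_path context_path (is_valid_context_path context_path)

-- ===== LEMMAS AND PROOFS =====

-- unfolding equations for PySem.Chars.splitOn.go at separator ['.']
theorem go_succ_cons (fuel : Nat) (c : Char) (rest cur : List Char) (acc : List (List Char)) :
    PySem.Chars.splitOn.go ['.'] (fuel+1) (c :: rest) cur acc =
      if c = '.' then
        PySem.Chars.splitOn.go ['.'] fuel rest [] (cur.reverse :: acc)
      else PySem.Chars.splitOn.go ['.'] fuel rest (c :: cur) acc := by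
  conv_lhs => rw [PySem.Chars.splitOn.go]
  by_cases h : c = '.'
  · have hp : ['.'].isPrefixOf (c :: rest) = true := by
      simp [List.isPrefixOf, h]
    rw [if_pos hp, if_pos h]
    rfl
  · have hp : ¬ (['.'].isPrefixOf (c :: rest) = true) := by
      have h' : ¬ ('.' = c) := fun e => h e.symm
      simp [List.isPrefixOf_iff_prefix, List.cons_prefix_cons, h']
    rw [if_neg hp, if_neg h]

theorem go_succ_nil (fuel : Nat) (cur : List Char) (acc : List (List Char)) :
    PySem.Chars.splitOn.go ['.'] (fuel+1) [] cur acc = (cur.reverse :: acc).reverse := by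
  rw [PySem.Chars.splitOn.go]
  omega

def segOk : Bool → List Char → Bool
  | b, [] => b
  | b, c :: rest => if c = '.' then b && segOk false rest else segOk true rest

theorem loop_eq_all (ps : List (List Char)) : is_valid_context_path_loop ps = ps.all (fun p => !p.isEmpty) := by
  induction ps with
  | nil => rfl
  | cons p rest ih => by_cases h : p.isEmpty <;> simp [is_valid_context_path_loop, h, ih]

theorem go_inv (fuel : Nat) (l cur : List Char) (acc : List (List Char)) (h : l.length ≤ fuel) :
    (PySem.Chars.splitOn.go ['.'] fuel l cur acc).all (fun p => !p.isEmpty)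
      = (acc.all (fun p => !p.isEmpty) && segOk (!cur.isEmpty) l) := by
  induction fuel generalizing l cur acc with
  | zero =>
    have : l = [] := List.length_eq_zero_iff.mp (Nat.le_zero.mp h)
    subst this
    rw [PySem.Chars.splitOn.go]
    simp [segOk, List.all_reverse, Bool.and_comm]
  | succ fuel ih =>
    cases l with
    | nil => rw [go_succ_nil]; simp [segOk, List.all_reverse, Bool.and_comm]
    | cons c rest =>
      by_cases hc : c = '.'
      · rw [go_succ_cons, if_pos hc, ih _ _ _ (by simpa using Nat.succ_le_succ_iff.mp h)]
        simp [hc, segOk, Bool.and_assoc, Bool.and_comm]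
      · rw [go_succ_cons, if_neg hc, ih _ _ _ (by simpa using Nat.succ_le_succ_iff.mp h)]
        simp [segOk, hc]

theorem go_ne_nil (fuel : Nat) (l cur : List Char) (acc : List (List Char)) :
    PySem.Chars.splitOn.go ['.'] fuel l cur acc ≠ [] := by
  induction fuel generalizing l cur acc with
  | zero => rw [PySem.Chars.splitOn.go]; simp
  | succ fuel ih =>
    cases l with
    | nil => rw [go_succ_nil]; simp
    | cons c rest => rw [go_succ_cons]; split_ifs <;> exact ih _ _ _

theorem isIn_dd_cons (c : Char) (l : List Char) :
    PySem.Chars.isIn ['.', '.'] (c :: l) =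
      (('.' == c) && PySem.Chars.startswith l ['.'] || PySem.Chars.isIn ['.', '.'] l) := by
  rw [Bool.eq_iff_iff]
  simp [PySem.Chars.isIn_iff_infix, PySem.Chars.startswith_iff, List.infix_cons_iff,
    List.cons_prefix_cons]

theorem endswith_dot_cons (c : Char) (l : List Char) :
    PySem.Chars.endswith (c :: l) ['.'] =
      (if l.isEmpty then ('.' == c) else PySem.Chars.endswith l ['.']) := by
  rw [Bool.eq_iff_iff]
  cases l with
  | nil => simp [PySem.Chars.endswith_iff, List.suffix_cons_iff]
  | cons d rest => simp [PySem.Chars.endswith_iff, List.suffix_cons_iff]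

theorem startswith_dot_cons (c : Char) (l : List Char) :
    PySem.Chars.startswith (c :: l) ['.'] = ('.' == c) := by
  rw [Bool.eq_iff_iff]
  simp [PySem.Chars.startswith_iff, List.cons_prefix_cons]

theorem segOk_char (l : List Char) :
    (segOk true l = !(PySem.Chars.isIn ['.', '.'] l || PySem.Chars.endswith l ['.']))
    ∧ (segOk false l = (!l.isEmpty &&
        !(PySem.Chars.startswith l ['.'] || PySem.Chars.endswith l ['.'] ||
          PySem.Chars.isIn ['.', '.'] l))) := by
  induction l with
  | nil => constructor <;> decide
  | cons c rest ih =>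
    obtain ⟨ihT, ihF⟩ := ih
    by_cases hc : c = '.'
    · subst hc
      cases rest with
      | nil => constructor <;> decide
      | cons d r2 =>
        refine ⟨?_, ?_⟩
        · rw [show segOk true ('.' :: d :: r2) = segOk false (d :: r2) from rfl, ihF,
            isIn_dd_cons '.' (d :: r2), endswith_dot_cons '.' (d :: r2)]
          simp [Bool.or_comm, Bool.or_left_comm]
        · rw [show segOk false ('.' :: d :: r2) = false from rfl,
            startswith_dot_cons '.' (d :: r2)]
          simp
    · have hc' : ('.' == c) = false := by
        exact beq_eq_false_iff_ne.mpr fun e => hc e.symm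
      refine ⟨?_, ?_⟩
      · rw [show segOk true (c :: rest) = if c = '.' then segOk false rest else segOk true rest
            from rfl, if_neg hc, ihT, isIn_dd_cons c rest, endswith_dot_cons c rest, hc']
        cases rest with
        | nil => decide
        | cons d r2 => simp
      · rw [show segOk false (c :: rest) = if c = '.' then false && segOk false rest
              else segOk true rest from rfl, if_neg hc, ihT, isIn_dd_cons c rest,
            endswith_dot_cons c rest, startswith_dot_cons c rest, hc']
        cases rest with
        | nil =>
          simp
          decide
        | cons d r2 => simp [Bool.and_comm]

theorem toList_ne_nil (s : String) (h : ¬ s = "") : s.toList ≠ [] := by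
  intro e
  exact h (by simpa using congrArg String.ofList e)

theorem A_ne_empty (s : String) (h : (s == "") = false) :
    is_valid_context_path s = segOk false s.toList := by
  unfold is_valid_context_path
  rw [h]
  simp only [Bool.false_eq_true, if_false]
  have hsplit : PySem.Chars.splitOn s.toList ['.']
      = PySem.Chars.splitOn.go ['.'] (s.toList.length + 1) s.toList [] [] := rfl
  cases hp : PySem.Chars.splitOn s.toList ['.'] with
  | nil => exact absurd (hsplit ▸ hp) (go_ne_nil _ _ _ _)
  | cons p0 rest =>
    dsimp only
    have hall : (p0 :: rest).all (fun p => !p.isEmpty) = segOk false s.toList := by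
      rw [← hp, hsplit, go_inv _ _ _ _ (Nat.le_succ _)]
      simp
    by_cases he : p0.isEmpty
    · simp only [he, List.all_cons, Bool.not_true, Bool.false_and] at hall
      rw [if_pos he]
      exact hall
    · rw [if_neg he, loop_eq_all, hall]

theorem B_ne_empty (s : String) (h : (s == "") = false) (hl : s.toList ≠ []) :
    is_valid_context_path_alt s = segOk false s.toList := by
  unfold is_valid_context_path_alt
  rw [h]
  simp only [Bool.false_eq_true, if_false]
  rw [(segOk_char s.toList).2]
  simp [hl]

theorem final (s : String) : is_valid_context_path s = is_valid_context_path_alt s := by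
  by_cases h : s = ""
  · subst h; decide
  · have hb : (s == "") = false := by simp [h]
    rw [A_ne_empty s hb, B_ne_empty s hb (toList_ne_nil s h)]

-- ===== VERDICT (by name: the statement is the Claim_ definition above) =====
theorem is_valid_context_path_spec : Claim_equal_is_valid_context_path := by
  intro context_path _
  unfold Spec_is_valid_context_path
  exact final context_path
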